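-- pv_equiv track=rewrite | github.com/eveem/adventofcode2024 | day_03/main.py | find_do_dont
-- ===== SOURCE A (Python) =====
-- from collections import defaultdict
--
-- def find_do_dont(s):
--     i = 0
--     n = len(s)
--     res = defaultdict(bool)
--     while i < n:
--         if s[i:i + 7] == "don't()":
--             res[i] = False
--         if s[i:i + 4] == "do()":
--             res[i] = True
--         i += 1
--
--     return res
-- ===== SOURCE B (Python) =====
-- from collections import defaultdict
--
--
-- def find_do_dont(s):
--     def positions(sub):
--         out, pos = [], 0
--         while (j := s.find(sub, pos)) != -1:
--             out.append(j)
--             pos = j + 1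
--         return out
--
--     pairs = [(j, False) for j in positions("don't()")] + \
--             [(j, True) for j in positions("do()")]
--     res = defaultdict(bool)
--     for j, v in sorted(pairs, key=lambda t: t[0]):
--         res[j] = v
--     return res
-- ===== Notes on version B (the rewrite author's own statement) =====
-- stated objective: faster
-- what changed: Instead of slicing and comparing at every character index, B runs two str.find loops that jump from occurrence to occurrence of "don't()" and "do()", then merges the found positions by index into the defaultdict.
import Mathlib
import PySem

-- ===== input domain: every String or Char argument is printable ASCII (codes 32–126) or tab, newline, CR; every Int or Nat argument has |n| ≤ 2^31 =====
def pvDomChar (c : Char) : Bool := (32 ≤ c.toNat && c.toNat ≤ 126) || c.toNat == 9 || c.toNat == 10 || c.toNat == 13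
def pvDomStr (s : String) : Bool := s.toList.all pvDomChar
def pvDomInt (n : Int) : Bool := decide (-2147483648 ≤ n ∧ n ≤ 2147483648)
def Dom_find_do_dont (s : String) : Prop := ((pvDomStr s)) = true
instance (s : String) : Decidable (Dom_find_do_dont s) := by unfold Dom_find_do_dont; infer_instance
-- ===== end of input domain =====

-- B replaces A's per-index scan by two str.find loops over the actual marker
-- occurrences, merged by position (objective: alternative traversal; the
-- returned defaultdict holds the same items in the same order).

-- ===== PORT A =====
-- A scans every index i, recording i ↦ False where "don't()" starts and i ↦ True
-- where "do()" starts, in a defaultdict (returned as its items in insertion order).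
def find_do_dont (s : String) : List (Int × Bool) :=
  let cs := s.toList
  let n := cs.length
  ((List.range n).foldl (fun (res : PySem.Dict Int Bool) (i : Nat) =>
      let res1 := if PySem.List.slice cs (some (i : Int)) (some ((i : Int) + 7)) = "don't()".toList
                  then res.insert (i : Int) false else res
      if PySem.List.slice cs (some (i : Int)) (some ((i : Int) + 4)) = "do()".toList
                  then res1.insert (i : Int) true else res1)
    PySem.Dict.empty).items

-- ===== PORT B =====
-- termination fact for the find-loop, cited by pvPosGo's decreasing_by
lemma pvFindFrom_eq_neg_one_of_lt (cs sub : List Char) (pos : Nat) (h : cs.length < pos) :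
    PySem.Chars.findFrom cs sub (pos : Int) none = -1 := by
  unfold PySem.Chars.findFrom
  split_ifs with h1
  all_goals simp_all
  omega

-- `while (j := s.find(sub, pos)) != -1: out.append(j); pos = j + 1`
def pvPosGo (cs sub : List Char) (pos : Nat) : List Int :=
  let j := PySem.Chars.findFrom cs sub (pos : Int) none
  if h : j = -1 then []
  else j :: pvPosGo cs sub (j.toNat + 1)
termination_by cs.length + 1 - pos
decreasing_by
  have hple : pos ≤ cs.length := by
    by_contra hc
    exact h (pvFindFrom_eq_neg_one_of_lt cs sub pos (by omega))
  have hspec := (PySem.Chars.findFrom_natCast_spec cs sub pos hple h).1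
  omega

def find_do_dont_alt (s : String) : List (Int × Bool) :=
  let donts := pvPosGo s.toList "don't()".toList 0
  let dos := pvPosGo s.toList "do()".toList 0
  let pairs := donts.map (fun j => (j, false)) ++ dos.map (fun j => (j, true))
  ((PySem.List.sorted pairs (fun t => t.1) false).foldl
      (fun d (p : Int × Bool) => d.insert p.1 p.2) PySem.Dict.empty).items

-- ===== PRECONDITION & SPEC =====
def Spec_find_do_dont (s : String) (out : List (Int × Bool)) : Prop := out = find_do_dont_alt s
instance (s : String) (out : List (Int × Bool)) : Decidable (Spec_find_do_dont s out) := by unfold Spec_find_do_dont; infer_instance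

-- ===== CLAIM (what is proved, stated in full; the proofs are below) =====
def Claim_equal_find_do_dont : Prop := ∀ (s : String), Dom_find_do_dont s → Spec_find_do_dont s (find_do_dont s)

-- ===== LEMMAS AND PROOFS =====
-- the common canonical value: for each index i in ascending order, (i, False) if
-- "don't()" starts at i, else (i, True) if "do()" starts at i
def pvF (cs : List Char) (i : Nat) : Option (Int × Bool) :=
  if "don't()".toList <+: cs.drop i then some ((i : Int), false)
  else if "do()".toList <+: cs.drop i then some ((i : Int), true) else none

def pvC (cs : List Char) : List (Int × Bool) := (List.range cs.length).filterMap (pvF cs)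

lemma pvDisj (l : List Char) (h7 : "don't()".toList <+: l) : ¬ ("do()".toList <+: l) := by
  intro h4
  have e7 := List.prefix_iff_eq_take.mp h7
  have e4 := List.prefix_iff_eq_take.mp h4
  rw [show "don't()".toList.length = 7 from rfl] at e7
  rw [show "do()".toList.length = 4 from rfl] at e4
  have : "do()".toList = (l.take 7).take 4 := by rw [List.take_take]; exact e4
  rw [← e7] at this
  exact absurd this (by decide)

lemma pvCond7 (cs : List Char) (i : Nat) :
    (PySem.List.slice cs (some (i : Int)) (some ((i : Int) + 7)) = "don't()".toList) ↔
      ("don't()".toList <+: cs.drop i) := by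
  have h : ((i : Int) + 7) = ((i : Int) + ((7 : Nat) : Int)) := by norm_num
  rw [h, PySem.List.slice_natCast_add, List.prefix_iff_eq_take,
    show "don't()".toList.length = 7 from rfl]
  exact eq_comm

lemma pvCond4 (cs : List Char) (i : Nat) :
    (PySem.List.slice cs (some (i : Int)) (some ((i : Int) + 4)) = "do()".toList) ↔
      ("do()".toList <+: cs.drop i) := by
  have h : ((i : Int) + 4) = ((i : Int) + ((4 : Nat) : Int)) := by norm_num
  rw [h, PySem.List.slice_natCast_add, List.prefix_iff_eq_take,
    show "do()".toList.length = 4 from rfl]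
  exact eq_comm

lemma pvFoldlFilterMap (cs : List Char) (l : List Nat) (init : PySem.Dict Int Bool) :
    l.foldl (fun res i => match pvF cs i with | some p => res.insert p.1 p.2 | none => res) init =
      (l.filterMap (pvF cs)).foldl (fun d (p : Int × Bool) => d.insert p.1 p.2) init := by
  induction l generalizing init with
  | nil => rfl
  | cons a t ih => cases h : pvF cs a <;> simp [h, ih]

lemma pvF_fst {cs : List Char} {i : Nat} {p : Int × Bool} (h : pvF cs i = some p) : p.1 = (i : Int) := by
  unfold pvF at h; split_ifs at h <;> cases h <;> rfl

lemma pvC_pairwise (cs : List Char) : (pvC cs).Pairwise (fun a b => a.1 < b.1) := by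
  unfold pvC
  rw [List.pairwise_filterMap]
  exact List.pairwise_lt_range.imp (by
    intro a b hab p hp q hq
    rw [pvF_fst hp, pvF_fst hq]; exact_mod_cast hab)

lemma pvC_keys_nodup (cs : List Char) : ((pvC cs).map Prod.fst).Nodup := by
  apply List.Pairwise.map (f := Prod.fst) (R := fun a b => a.1 < b.1) (S := (· ≠ ·))
  · intro a b h; exact ne_of_lt h
  · exact pvC_pairwise cs

lemma pvFold_items (cs : List Char) :
    ((pvC cs).foldl (fun d (p : Int × Bool) => d.insert p.1 p.2) PySem.Dict.empty).items = pvC cs := by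
  rw [PySem.Dict.items_foldl_insert_fresh (pvC cs) Prod.fst Prod.snd PySem.Dict.empty
    (by intro a _; simp [PySem.Dict.empty]) (pvC_keys_nodup cs)]
  simp [PySem.Dict.empty]

lemma pvA_eq (s : String) : find_do_dont s = pvC s.toList := by
  unfold find_do_dont
  show ((List.range s.toList.length).foldl (fun (res : PySem.Dict Int Bool) (i : Nat) =>
      let res1 := if PySem.List.slice s.toList (some (i : Int)) (some ((i : Int) + 7)) = "don't()".toList
                  then res.insert (i : Int) false else res
      if PySem.List.slice s.toList (some (i : Int)) (some ((i : Int) + 4)) = "do()".toList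
                  then res1.insert (i : Int) true else res1)
    PySem.Dict.empty).items = pvC s.toList
  have hstep : (fun (res : PySem.Dict Int Bool) (i : Nat) =>
      let res1 := if PySem.List.slice s.toList (some (i : Int)) (some ((i : Int) + 7)) = "don't()".toList
                  then res.insert (i : Int) false else res
      if PySem.List.slice s.toList (some (i : Int)) (some ((i : Int) + 4)) = "do()".toList
                  then res1.insert (i : Int) true else res1) =
      (fun res i => match pvF s.toList i with | some p => res.insert p.1 p.2 | none => res) := by
    funext res i
    simp only [pvCond7, pvCond4, pvF]
    by_cases h7 : "don't()".toList <+: s.toList.drop i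
    · have h4 := pvDisj _ h7
      simp only [if_pos h7, if_neg h4]
    · by_cases h4 : "do()".toList <+: s.toList.drop i
      · simp only [if_pos h4, if_neg h7]
      · simp only [if_neg h4, if_neg h7]
  rw [hstep, pvFoldlFilterMap]
  exact pvFold_items s.toList

lemma pvPosGo_eq (cs sub : List Char) (hsub : sub ≠ []) (pos : Nat) :
    pvPosGo cs sub pos =
      ((List.range' pos (cs.length - pos)).filter
        (fun i => decide (sub <+: cs.drop i))).map (fun (i : Nat) => (i : Int)) := by
  rw [pvPosGo]
  by_cases h : PySem.Chars.findFrom cs sub (pos : Int) none = -1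
  · rw [dif_pos h]
    by_cases hp : cs.length < pos
    · rw [Nat.sub_eq_zero_of_le (by omega)]; rfl
    · have hni := (PySem.Chars.findFrom_natCast_eq_neg_one_iff cs sub pos (by omega)).mp h
      symm
      rw [List.map_eq_nil_iff, List.filter_eq_nil_iff]
      intro i hi hpre
      rw [List.mem_range'_1] at hi
      apply hni
      rw [← PySem.Chars.isIn_iff_infix, ← PySem.Chars.exists_prefix_drop_iff_isIn]
      refine ⟨i - pos, ?_⟩
      rw [List.drop_drop, show pos + (i - pos) = i by omega]
      simpa using hpre
  · rw [dif_neg h]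
    have hple : pos ≤ cs.length := by
      by_contra hc
      exact h (pvFindFrom_eq_neg_one_of_lt cs sub pos (by omega))
    obtain ⟨h1, h2, h3⟩ := PySem.Chars.findFrom_natCast_spec cs sub pos hple h
    set j := PySem.Chars.findFrom cs sub (pos : Int) none with hj
    have hj0 : 0 ≤ j := le_trans (by exact_mod_cast Nat.zero_le pos) h1
    have hpt : pos ≤ j.toNat := by omega
    have htlen : j.toNat < cs.length := by
      have hl := h2.length_le
      rw [List.length_drop] at hl
      have : 0 < sub.length := List.length_pos_iff.mpr hsub
      omega
    have hsplit : List.range' pos (cs.length - pos) =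
        List.range' pos (j.toNat - pos) ++ List.range' j.toNat (cs.length - j.toNat) := by
      have := List.range'_append (s := pos) (m := j.toNat - pos) (n := cs.length - j.toNat) (step := 1)
      rw [show pos + 1 * (j.toNat - pos) = j.toNat by omega] at this
      rw [show cs.length - pos = (j.toNat - pos) + (cs.length - j.toNat) by omega]
      exact this.symm
    rw [hsplit, List.filter_append, List.map_append]
    have hfirst : (List.range' pos (j.toNat - pos)).filter (fun i => decide (sub <+: cs.drop i)) = [] := by
      rw [List.filter_eq_nil_iff]
      intro i hi hpre
      rw [List.mem_range'_1] at hi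
      exact h3 i hi.1 (by omega) (by simpa using hpre)
    rw [hfirst]
    have hsecond : List.range' j.toNat (cs.length - j.toNat) =
        j.toNat :: List.range' (j.toNat + 1) (cs.length - (j.toNat + 1)) := by
      rw [show cs.length - j.toNat = (cs.length - (j.toNat + 1)) + 1 by omega]
      rw [List.range'_succ]
    rw [hsecond, List.filter_cons, if_pos (by simpa using h2)]
    simp only [List.map_cons]
    rw [pvPosGo_eq cs sub hsub (j.toNat + 1)]
    congr 1
    omega
termination_by cs.length + 1 - pos
decreasing_by omega

lemma pvPerm (cs : List Char) (l : List Nat) :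
    ((l.filter (fun i => decide ("don't()".toList <+: cs.drop i))).map (fun (i : Nat) => ((i : Int), false)) ++
     (l.filter (fun i => decide ("do()".toList <+: cs.drop i))).map (fun (i : Nat) => ((i : Int), true))).Perm
      (l.filterMap (pvF cs)) := by
  induction l with
  | nil => rfl
  | cons a t ih =>
    by_cases h7 : "don't()".toList <+: cs.drop a
    · have h4 := pvDisj _ h7
      simp only [List.filter_cons, List.filterMap_cons, pvF, if_pos h7, if_neg h4,
        decide_eq_true_eq, decide_eq_false h4]
      simpa using ih.cons ((a : Int), false)
    · by_cases h4 : "do()".toList <+: cs.drop a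
      · simp only [List.filter_cons, List.filterMap_cons, pvF, if_pos h4, if_neg h7,
          decide_eq_true_eq, decide_eq_false h7]
        simp only [List.map_cons]
        exact (List.perm_middle.trans (ih.cons ((a : Int), true)))
      · simp only [List.filter_cons, List.filterMap_cons, pvF, if_neg h4, if_neg h7,
          decide_eq_false h7, decide_eq_false h4]
        exact ih

lemma pvB_eq (s : String) : find_do_dont_alt s = pvC s.toList := by
  unfold find_do_dont_alt
  show ((PySem.List.sorted
      ((pvPosGo s.toList "don't()".toList 0).map (fun j => (j, false)) ++
       (pvPosGo s.toList "do()".toList 0).map (fun j => (j, true))) (fun t => t.1) false).foldl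
      (fun d (p : Int × Bool) => d.insert p.1 p.2) PySem.Dict.empty).items = pvC s.toList
  rw [pvPosGo_eq s.toList _ (by decide) 0, pvPosGo_eq s.toList _ (by decide) 0]
  rw [List.map_map, List.map_map]
  have hsorted : PySem.List.sorted
      (((List.range' 0 (s.toList.length - 0)).filter (fun i => decide ("don't()".toList <+: s.toList.drop i))).map ((fun j => (j, false)) ∘ (fun (i : Nat) => (i : Int))) ++
       ((List.range' 0 (s.toList.length - 0)).filter (fun i => decide ("do()".toList <+: s.toList.drop i))).map ((fun j => (j, true)) ∘ (fun (i : Nat) => (i : Int))))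
      (fun t => t.1) false = pvC s.toList := by
    apply PySem.List.sorted_eq_of_perm_of_pairwise_lt
    · have hr : List.range' 0 (s.toList.length - 0) = List.range s.toList.length := by
        simp [List.range_eq_range']
      rw [hr]
      simpa [Function.comp] using (pvPerm s.toList (List.range s.toList.length)).symm
    · exact pvC_pairwise s.toList
  rw [hsorted]
  exact pvFold_items s.toList

-- ===== VERDICT (by name: the statement is the Claim_ definition above) =====
theorem find_do_dont_spec : Claim_equal_find_do_dont := by
  intro s _
  unfold Spec_find_do_dont
  rw [pvA_eq, pvB_eq]
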